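-- pv_equiv track=rewrite | github.com/msv-lab/HoarePrompt | src/node_base_style/task_sorter.py | sort_post_by_depth
-- ===== SOURCE A (Python) =====
-- def sort_post_by_depth(elements):
--     elements_processed_list = []
--     #make a list total_tree of the  elem[0], elem[1], elem[3] for each element in elements
--     total_tree = [(elem[3], elem[1], elem[2], False, elem[4]) for elem in elements]
--     elements_processed = 0
--     while elements_processed < len(elements):
--         # Iterate through the elements of the list from first to last
--         for i in range(len(elements)):
--             if elements[i] not in elements_processed_list:
--                 elements_processed_list.append(elements[i])
--                 current_element, current_depth, type, is_comment, idx = elements[i]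
--                 elements_processed += 1
--                 break
--
--         # find the index of the element in the total_tree where elem[4] == idx
--         j = 0
--         while j < len(total_tree) and total_tree[j][4] != idx:
--             j += 1
--         # We will try to insert the current element in the total_tree list. We move to the right of that list until we find an element with equal or lower depth and we insert the current element before that element(or in the end of the list if we don't find any element with equal or lower depth)
--         j+=1
--
--         while j < len(total_tree) and total_tree[j][1] > current_depth:
--             j += 1
--         total_tree.insert(j, (current_element, current_depth, type, True, idx))
--
--     return total_tree
-- ===== SOURCE B (Python) =====
-- # B: single left-to-right pass keeping a stack of pending close entries
-- # (depths strictly increasing toward the top); O(n) vs A's repeated scans.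
-- def sort_post_by_depth(elements):
--     out = []
--     stack = []  # pending close entries, top at end
--     for (name, depth, typ, opentag, idx) in elements:
--         while stack and stack[-1][1] >= depth:
--             out.append(stack.pop())
--         out.append((opentag, depth, typ, False, idx))
--         stack.append((name, depth, typ, True, idx))
--     while stack:
--         out.append(stack.pop())
--     return out
-- ===== Notes on version B (the rewrite author's own statement) =====
-- stated objective: faster
-- what changed: Replaces A's outer rescan-for-unprocessed loop, per-element linear index search and mid-list insertion with a single left-to-right pass that keeps a stack of pending close entries and pops them when the depth drops.
import Mathlib
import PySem

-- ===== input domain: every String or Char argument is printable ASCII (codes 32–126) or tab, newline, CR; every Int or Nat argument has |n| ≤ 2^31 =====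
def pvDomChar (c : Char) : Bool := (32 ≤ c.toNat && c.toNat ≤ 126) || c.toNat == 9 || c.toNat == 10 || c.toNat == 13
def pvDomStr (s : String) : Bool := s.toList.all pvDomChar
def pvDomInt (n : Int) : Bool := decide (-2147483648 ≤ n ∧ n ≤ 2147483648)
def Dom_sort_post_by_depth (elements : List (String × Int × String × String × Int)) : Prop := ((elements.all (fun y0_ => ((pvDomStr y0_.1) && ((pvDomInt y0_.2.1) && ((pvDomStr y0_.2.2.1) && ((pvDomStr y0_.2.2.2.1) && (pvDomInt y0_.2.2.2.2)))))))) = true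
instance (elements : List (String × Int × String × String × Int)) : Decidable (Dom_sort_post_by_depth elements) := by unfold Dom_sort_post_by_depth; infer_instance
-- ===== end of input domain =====

-- B replaces A's repeated membership scans, index searches and mid-list insertions
-- by one left-to-right pass with a stack of pending close entries (objective: faster).

-- ===== PORT A =====

-- open (False) entry made from an element: (elem[3], elem[1], elem[2], False, elem[4])
def pvFE (e : String × Int × String × String × Int) : String × Int × String × Bool × Int :=
  (e.2.2.2.1, e.2.1, e.2.2.1, false, e.2.2.2.2)

-- close (True) entry made from an element: (elem[0], elem[1], elem[2], True, elem[4])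
def pvTE (e : String × Int × String × String × Int) : String × Int × String × Bool × Int :=
  (e.1, e.2.1, e.2.2.1, true, e.2.2.2.2)

-- `j = 0; while j < len(tree) and tree[j][4] != idx: j += 1`
def pvFindJ (tree : List (String × Int × String × Bool × Int)) (idx : Int) : Nat :=
  match tree with
  | [] => 0
  | x :: xs => if x.2.2.2.2 = idx then 0 else pvFindJ xs idx + 1

-- `while j < len(tree) and tree[j][1] > d: j += 1`, counted on the suffix from j
def pvSkipC (tree : List (String × Int × String × Bool × Int)) (d : Int) : Nat :=
  match tree with
  | [] => 0
  | x :: xs => if d < x.2.1 then pvSkipC xs d + 1 else 0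

-- the outer `while elements_processed < len(elements)` loop; fuel = len - processed.
-- If the inner for-loop finds no unprocessed element Python loops forever (only on
-- duplicate tuples, outside Pre_); the port then returns the current tree.
def pvLoopA (elements : List (String × Int × String × String × Int)) (fuel : Nat)
    (processed : List (String × Int × String × String × Int))
    (tree : List (String × Int × String × Bool × Int)) :
    List (String × Int × String × Bool × Int) :=
  match fuel with
  | 0 => tree
  | fuel + 1 =>
    match elements.find? (fun e => !(decide (e ∈ processed))) with
    | none => tree
    | some e =>
      let j0 := pvFindJ tree e.2.2.2.2 + 1
      let j := j0 + pvSkipC (tree.drop j0) e.2.1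
      pvLoopA elements fuel (processed ++ [e]) (PySem.List.insert tree (j : Int) (pvTE e))

def sort_post_by_depth (elements : List (String × Int × String × String × Int)) :
    List (String × Int × String × Bool × Int) :=
  pvLoopA elements elements.length [] (elements.map pvFE)

-- ===== PORT B =====

-- `while stack and stack[-1][1] >= depth: out.append(stack.pop())` : (popped, rest); head = top
def pvPopGE (d : Int) (stack : List (String × Int × String × Bool × Int)) :
    List (String × Int × String × Bool × Int) × List (String × Int × String × Bool × Int) :=
  match stack with
  | [] => ([], [])
  | t :: ts => if d ≤ t.2.1 then ((t :: (pvPopGE d ts).1), (pvPopGE d ts).2) else ([], t :: ts)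

def pvLoopB (elements : List (String × Int × String × String × Int))
    (stack out : List (String × Int × String × Bool × Int)) :
    List (String × Int × String × Bool × Int) :=
  match elements with
  | [] => out ++ stack
  | e :: es =>
    pvLoopB es (pvTE e :: (pvPopGE e.2.1 stack).2) (out ++ (pvPopGE e.2.1 stack).1 ++ [pvFE e])

def sort_post_by_depth_alt (elements : List (String × Int × String × String × Int)) :
    List (String × Int × String × Bool × Int) :=
  pvLoopB elements [] []

-- ===== PRECONDITION & SPEC =====
-- Pre_ excludes lists whose idx fields (elem[4]) are not pairwise distinct: on a
-- duplicated whole tuple A loops forever, and on a duplicated idx A's first-match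
-- idx lookup places the close entry accidentally, a corner no caller would specify.
def Pre_sort_post_by_depth (elements : List (String × Int × String × String × Int)) : Prop :=
  (elements.map (fun e => e.2.2.2.2)).Nodup
instance (elements : List (String × Int × String × String × Int)) : Decidable (Pre_sort_post_by_depth elements) := by unfold Pre_sort_post_by_depth; infer_instance

def pvWitness_sort_post_by_depth : (List (String × Int × String × String × Int)) :=
  [("a", 1, "x", "p", 0), ("b", 2, "y", "q", 1), ("c", 1, "z", "r", 2)]

def Spec_sort_post_by_depth (elements : List (String × Int × String × String × Int)) (out : List (String × Int × String × Bool × Int)) : Prop := out = sort_post_by_depth_alt elements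
instance (elements : List (String × Int × String × String × Int)) (out : List (String × Int × String × Bool × Int)) : Decidable (Spec_sort_post_by_depth elements out) := by unfold Spec_sort_post_by_depth; infer_instance

-- ===== CLAIM (what is proved, stated in full; the proofs are below) =====
def Claim_equal_sort_post_by_depth : Prop := ∀ (elements : List (String × Int × String × String × Int)), Dom_sort_post_by_depth elements → Pre_sort_post_by_depth elements → Spec_sort_post_by_depth elements (sort_post_by_depth elements)

-- ===== LEMMAS AND PROOFS =====

-- how B's pending closes will interleave with the remaining open entries
def pvFlush (stack fs : List (String × Int × String × Bool × Int)) :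
    List (String × Int × String × Bool × Int) :=
  match fs with
  | [] => stack
  | f :: fs => (pvPopGE f.2.1 stack).1 ++ f :: pvFlush (pvPopGE f.2.1 stack).2 fs

theorem pvFlush_nil (fs : List (String × Int × String × Bool × Int)) : pvFlush [] fs = fs := by
  induction fs with
  | nil => rfl
  | cons f fs ih => simp [pvFlush, pvPopGE, ih]

theorem pvPopGE_append (d : Int) (s : List (String × Int × String × Bool × Int)) :
    (pvPopGE d s).1 ++ (pvPopGE d s).2 = s := by
  induction s with
  | nil => rfl
  | cons t ts ih => by_cases h : d ≤ t.2.1 <;> simp [pvPopGE, h, ih]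

theorem pvPopGE_mem_left (d : Int) (s : List (String × Int × String × Bool × Int))
    (t : String × Int × String × Bool × Int) (h : t ∈ (pvPopGE d s).1) : t ∈ s := by
  rw [← pvPopGE_append d s]; exact List.mem_append_left _ h

theorem pvPopGE_mem_right (d : Int) (s : List (String × Int × String × Bool × Int))
    (t : String × Int × String × Bool × Int) (h : t ∈ (pvPopGE d s).2) : t ∈ s := by
  rw [← pvPopGE_append d s]; exact List.mem_append_right _ h

theorem pvPopGE_of_all_lt (d : Int) (s : List (String × Int × String × Bool × Int))
    (h : ∀ t ∈ s, t.2.1 < d) : pvPopGE d s = ([], s) := by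
  cases s with
  | nil => rfl
  | cons t ts =>
    have : ¬ d ≤ t.2.1 := by have := h t (by simp); omega
    simp [pvPopGE, this]

-- rest of a pop on a depth-decreasing stack: all entries strictly below d
theorem pvPopGE_rest_lt (d : Int) (s : List (String × Int × String × Bool × Int))
    (hs : s.Pairwise (fun a b => b.2.1 < a.2.1)) :
    ∀ t ∈ (pvPopGE d s).2, t.2.1 < d := by
  induction s with
  | nil => simp [pvPopGE]
  | cons x xs ih =>
    rw [List.pairwise_cons] at hs
    by_cases h : d ≤ x.2.1
    · simpa [pvPopGE, h] using ih hs.2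
    · intro t ht
      simp only [pvPopGE, h, if_false] at ht
      rcases List.mem_cons.mp ht with rfl | ht
      · omega
      · have := hs.1 t ht; omega

theorem pvPopGE_rest_pairwise (d : Int) (s : List (String × Int × String × Bool × Int))
    (hs : s.Pairwise (fun a b => b.2.1 < a.2.1)) :
    (pvPopGE d s).2.Pairwise (fun a b => b.2.1 < a.2.1) := by
  have hsub : (pvPopGE d s).2.Sublist s := by
    conv_rhs => rw [← pvPopGE_append d s]
    exact List.sublist_append_right _ _
  exact hs.sublist hsub

theorem pvSkipC_zero (d : Int) (l : List (String × Int × String × Bool × Int))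
    (h : ∀ t, l.head? = some t → ¬ d < t.2.1) : pvSkipC l d = 0 := by
  cases l with
  | nil => rfl
  | cons x xs => have := h x rfl; simp [pvSkipC, this]

theorem pvSkipC_le (d : Int) (l : List (String × Int × String × Bool × Int)) :
    pvSkipC l d ≤ l.length := by
  induction l with
  | nil => simp [pvSkipC]
  | cons x xs ih => by_cases h : d < x.2.1 <;> simp [pvSkipC, h] <;> omega

theorem pvFindJ_append (l1 l2 : List (String × Int × String × Bool × Int)) (i : Int)
    (h : ∀ t ∈ l1, t.2.2.2.2 ≠ i) : pvFindJ (l1 ++ l2) i = l1.length + pvFindJ l2 i := by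
  induction l1 with
  | nil => simp [pvFindJ]
  | cons x xs ih =>
    have hx : x.2.2.2.2 ≠ i := h x (by simp)
    have := ih (fun t ht => h t (by simp [ht]))
    simp [pvFindJ, hx, this]; omega

-- inserting a close entry of depth d after the leading run of deeper entries
-- of pvFlush r fs equals pushing it on the stack before flushing
theorem pvInsert_flush (x : String × Int × String × Bool × Int) (d : Int) (hx : x.2.1 = d)
    (r fs : List (String × Int × String × Bool × Int)) (hr : ∀ t ∈ r, t.2.1 < d) :
    (pvFlush r fs).take (pvSkipC (pvFlush r fs) d) ++ x :: (pvFlush r fs).drop (pvSkipC (pvFlush r fs) d)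
      = pvFlush (x :: r) fs := by
  induction fs generalizing r with
  | nil =>
    have h0 : pvSkipC (pvFlush r []) d = 0 := by
      apply pvSkipC_zero
      intro t ht
      cases r with
      | nil => simp [pvFlush] at ht
      | cons a as =>
        simp only [pvFlush, List.head?_cons, Option.some.injEq] at ht
        subst ht
        have := hr a (by simp); omega
    simp only [pvFlush] at h0 ⊢
    rw [h0]; simp
  | cons f fs ih =>
    by_cases hf : f.2.1 ≤ d
    · -- x gets popped by f: both sides start with x
      have hpop : pvPopGE f.2.1 (x :: r) =
          (x :: (pvPopGE f.2.1 r).1, (pvPopGE f.2.1 r).2) := by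
        simp [pvPopGE, hx, hf]
      have h0 : pvSkipC (pvFlush r (f :: fs)) d = 0 := by
        apply pvSkipC_zero
        intro t ht
        simp only [pvFlush] at ht
        cases hp : (pvPopGE f.2.1 r).1 with
        | nil =>
          rw [hp] at ht
          simp only [List.nil_append, List.head?_cons, Option.some.injEq] at ht
          subst ht; omega
        | cons a as =>
          rw [hp] at ht
          simp only [List.cons_append, List.head?_cons, Option.some.injEq] at ht
          subst ht
          have ha : a ∈ r := pvPopGE_mem_left _ _ _ (by rw [hp]; simp)
          have := hr a ha; omega
      rw [h0]
      simp only [List.take_zero, List.drop_zero, List.nil_append]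
      show x :: pvFlush r (f :: fs) = pvFlush (x :: r) (f :: fs)
      simp only [pvFlush, hpop]
      simp
    · -- f is deeper than d: both sides start with f
      have hfd : d < f.2.1 := by omega
      have hpopx : pvPopGE f.2.1 (x :: r) = ([], x :: r) := by
        apply pvPopGE_of_all_lt
        intro t ht
        rcases List.mem_cons.mp ht with rfl | ht
        · omega
        · have := hr t ht; omega
      have hpopr : pvPopGE f.2.1 r = ([], r) := by
        apply pvPopGE_of_all_lt
        intro t ht
        have := hr t ht; omega
      rw [show pvFlush r (f :: fs) = f :: pvFlush r fs by
        simp only [pvFlush, hpopr]; simp]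
      rw [show pvFlush (x :: r) (f :: fs) = f :: pvFlush (x :: r) fs by
        simp only [pvFlush, hpopx]; simp]
      simp only [pvSkipC, hfd, if_pos, List.take_succ_cons, List.drop_succ_cons,
        List.cons_append]
      exact congrArg (f :: ·) (ih r hr)

-- find? only looks at the predicate's values on the list's members
theorem pvFind_congr_mem {α : Type} (l : List α) (p q : α → Bool)
    (h : ∀ x ∈ l, p x = q x) : l.find? p = l.find? q := by
  induction l with
  | nil => rfl
  | cons x xs ih =>
    have hx := h x (by simp)
    by_cases hp : p x = true
    · rw [List.find?_cons_of_pos hp, List.find?_cons_of_pos (hx ▸ hp)]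
    · rw [List.find?_cons_of_neg hp, List.find?_cons_of_neg (by rw [← hx]; exact hp)]
      exact ih (fun y hy => h y (by simp [hy]))

-- the scan `for i in range(len): if elements[i] not in processed: … break`
-- picks exactly the k-th element when processed = elements.take k and elements is duplicate-free
theorem pvScan_take (l : List (String × Int × String × String × Int)) (k : Nat) (hl : l.Nodup) :
    l.find? (fun e => !(decide (e ∈ l.take k))) = l[k]? := by
  induction l generalizing k with
  | nil => simp
  | cons x xs ih =>
    rw [List.nodup_cons] at hl
    cases k with
    | zero => simp [List.find?]
    | succ k =>
      have hcongr : xs.find? (fun e => !(decide (e ∈ (x :: xs).take (k + 1)))) =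
          xs.find? (fun e => !(decide (e ∈ xs.take k))) := by
        apply pvFind_congr_mem
        intro y hy
        have hyx : y ≠ x := fun h => hl.1 (h ▸ hy)
        simp [List.take_succ_cons, hyx]
      rw [List.find?_cons_of_neg (by simp)]
      rw [hcongr, ih k hl.2]
      simp

-- A's outer loop, re-expressed as structural recursion on the yet-unprocessed suffix
def pvLoopA2 (es : List (String × Int × String × String × Int))
    (tree : List (String × Int × String × Bool × Int)) :
    List (String × Int × String × Bool × Int) :=
  match es with
  | [] => tree
  | e :: es =>
    pvLoopA2 es (PySem.List.insert tree
      ((pvFindJ tree e.2.2.2.2 + 1 + pvSkipC (tree.drop (pvFindJ tree e.2.2.2.2 + 1)) e.2.1 : Nat) : Int)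
      (pvTE e))

-- bridge: under Nodup, A's outer loop processes the elements in list order
theorem pvLoopA_eq_A2 (elements : List (String × Int × String × String × Int))
    (hl : elements.Nodup) :
    ∀ (fuel k : Nat) (tree : List (String × Int × String × Bool × Int)),
      fuel = elements.length - k →
      pvLoopA elements fuel (elements.take k) tree = pvLoopA2 (elements.drop k) tree := by
  intro fuel
  induction fuel with
  | zero =>
    intro k tree hk
    have : elements.length ≤ k := by omega
    simp [pvLoopA, List.drop_eq_nil_of_le this, pvLoopA2]
  | succ fuel ih =>
    intro k tree hk
    have hklt : k < elements.length := by omega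
    have hfind := pvScan_take elements k hl
    have hget : elements[k]? = some elements[k] := List.getElem?_eq_getElem hklt
    have hdrop : elements.drop k = elements[k] :: elements.drop (k + 1) :=
      List.drop_eq_getElem_cons hklt
    have htake : elements.take (k + 1) = elements.take k ++ [elements[k]] := by
      rw [List.take_add_one, hget]; rfl
    rw [hget] at hfind
    simp only [pvLoopA]
    rw [hfind]
    show pvLoopA elements fuel (elements.take k ++ [elements[k]]) _ = _
    rw [← htake, ih (k + 1) _ (by omega), hdrop]
    rfl

-- main invariant: A's tree is B's emitted output followed by the pending closes
-- flushed through the remaining open entries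
theorem pvMain (es : List (String × Int × String × String × Int)) :
    ∀ (stack out : List (String × Int × String × Bool × Int)),
      (es.map (fun e => e.2.2.2.2)).Nodup →
      (∀ t ∈ out, ∀ e ∈ es, t.2.2.2.2 ≠ e.2.2.2.2) →
      (∀ t ∈ stack, ∀ e ∈ es, t.2.2.2.2 ≠ e.2.2.2.2) →
      stack.Pairwise (fun a b => b.2.1 < a.2.1) →
      pvLoopA2 es (out ++ pvFlush stack (es.map pvFE)) = pvLoopB es stack out := by
  induction es with
  | nil => intro stack out _ _ _ _; simp [pvLoopA2, pvFlush, pvLoopB]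
  | cons e es ih =>
    intro stack out hnd hout hstack hpw
    have hidx : e.2.2.2.2 ∉ es.map (fun e => e.2.2.2.2) := (List.nodup_cons.mp hnd).1
    have hflush : pvFlush stack (pvFE e :: es.map pvFE) =
        (pvPopGE e.2.1 stack).1 ++ pvFE e :: pvFlush (pvPopGE e.2.1 stack).2 (es.map pvFE) := rfl
    have hpre : ∀ t ∈ out ++ (pvPopGE e.2.1 stack).1, t.2.2.2.2 ≠ e.2.2.2.2 := by
      intro t ht
      rcases List.mem_append.mp ht with ht | ht
      · exact hout t ht e (by simp)
      · exact hstack t (pvPopGE_mem_left _ _ _ ht) e (by simp)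
    have hfind : pvFindJ (out ++ pvFlush stack (pvFE e :: es.map pvFE)) e.2.2.2.2 =
        (out ++ (pvPopGE e.2.1 stack).1).length := by
      rw [hflush, ← List.append_assoc, pvFindJ_append _ _ _ hpre]
      simp [pvFindJ, pvFE]
    have hrlt : ∀ t ∈ (pvPopGE e.2.1 stack).2, t.2.1 < e.2.1 := pvPopGE_rest_lt _ _ hpw
    have hkey := pvInsert_flush (pvTE e) e.2.1 rfl (pvPopGE e.2.1 stack).2 (es.map pvFE) hrlt
    have htree : out ++ pvFlush stack (pvFE e :: es.map pvFE) =
        (out ++ (pvPopGE e.2.1 stack).1 ++ [pvFE e]) ++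
          pvFlush (pvPopGE e.2.1 stack).2 (es.map pvFE) := by
      rw [hflush]; simp
    have hpreflen : (out ++ (pvPopGE e.2.1 stack).1 ++ [pvFE e]).length =
        (out ++ (pvPopGE e.2.1 stack).1).length + 1 := by simp [Nat.add_assoc]
    have hdrop : (out ++ pvFlush stack (pvFE e :: es.map pvFE)).drop
        ((out ++ (pvPopGE e.2.1 stack).1).length + 1) =
        pvFlush (pvPopGE e.2.1 stack).2 (es.map pvFE) := by
      rw [htree, ← hpreflen, List.drop_left]
    have hmle : pvSkipC (pvFlush (pvPopGE e.2.1 stack).2 (es.map pvFE)) e.2.1 ≤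
        (pvFlush (pvPopGE e.2.1 stack).2 (es.map pvFE)).length := pvSkipC_le _ _
    have hins : PySem.List.insert (out ++ pvFlush stack (pvFE e :: es.map pvFE))
        (((out ++ (pvPopGE e.2.1 stack).1).length + 1 +
          pvSkipC (pvFlush (pvPopGE e.2.1 stack).2 (es.map pvFE)) e.2.1 : Nat) : Int) (pvTE e)
        = (out ++ (pvPopGE e.2.1 stack).1 ++ [pvFE e]) ++
            pvFlush (pvTE e :: (pvPopGE e.2.1 stack).2) (es.map pvFE) := by
      rw [htree, ← hpreflen]
      rw [PySem.List.insert_natCast _ _ _ (by simp only [List.length_append]; omega)]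
      rw [List.take_append, List.drop_append]
      rw [List.take_of_length_le (by omega), List.drop_eq_nil_of_le (by omega)]
      simp only [Nat.add_sub_cancel_left, List.nil_append]
      simp only [List.append_assoc]
      rw [hkey]
    simp only [List.map_cons, pvLoopA2, pvLoopB]
    rw [hfind, hdrop, hins]
    have hstep := ih (pvTE e :: (pvPopGE e.2.1 stack).2)
        (out ++ (pvPopGE e.2.1 stack).1 ++ [pvFE e])
        (List.nodup_cons.mp hnd).2
        (by
          intro t ht e' he'
          rcases List.mem_append.mp ht with ht | ht
          · rcases List.mem_append.mp ht with ht | ht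
            · exact hout t ht e' (by simp [he'])
            · exact hstack t (pvPopGE_mem_left _ _ _ ht) e' (by simp [he'])
          · simp only [List.mem_singleton] at ht
            subst ht
            show e.2.2.2.2 ≠ e'.2.2.2.2
            intro hc
            exact hidx (hc ▸ List.mem_map_of_mem he'))
        (by
          intro t ht e' he'
          rcases List.mem_cons.mp ht with rfl | ht
          · show e.2.2.2.2 ≠ e'.2.2.2.2
            intro hc
            exact hidx (hc ▸ List.mem_map_of_mem he')
          · exact hstack t (pvPopGE_mem_right _ _ _ ht) e' (by simp [he']))
        (by
          rw [List.pairwise_cons]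
          exact ⟨fun t ht => hrlt t ht, pvPopGE_rest_pairwise _ _ hpw⟩)
    simpa [List.append_assoc] using hstep

-- ===== VERDICT (by name: the statement is the Claim_ definition above) =====
theorem sort_post_by_depth_spec : Claim_equal_sort_post_by_depth := by
  intro elements _ hpre
  unfold Spec_sort_post_by_depth sort_post_by_depth sort_post_by_depth_alt
  have hnd : elements.Nodup := hpre.of_map
  have h := pvLoopA_eq_A2 elements hnd elements.length 0 (elements.map pvFE) (by simp)
  simp only [List.take_zero, List.drop_zero] at h
  rw [h]
  have h2 := pvMain elements [] [] hpre (by simp) (by simp) (by simp)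
  simpa [pvFlush_nil] using h2
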